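-- pv_equiv track=rewrite | github.com/Mxo01/AdventOfCode | 2024/Day 15 - Warehouse Woes/1.py | parse_puzzle
-- ===== SOURCE A (Python) =====
-- def parse_puzzle(lines):
--     grid = []
--     moves = ""
--     grid_readed = False
--     robot_pos = None
--
--     for i, line in enumerate(lines):
--         if line.strip() == "":
--             grid_readed = True
--             continue
--
--         if not grid_readed:
--
--             if "@" in line:
--                 robot_pos = (i, line.index("@"))
--
--             grid.append(list(line))
--
--         if grid_readed:
--             moves += line
--
--     return grid, list(moves), robot_pos
-- ===== SOURCE B (Python) =====
-- def parse_puzzle(lines):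
--     # separator = first blank line (default: end of input)
--     sep = next((i for i, l in enumerate(lines) if l.strip() == ""), len(lines))
--     grid = [list(l) for l in lines[:sep]]
--     robot_pos = None
--     for i, l in reversed(list(enumerate(lines[:sep]))):
--         j = l.find("@")
--         if j != -1:
--             robot_pos = (i, j)
--             break
--     moves = "".join(l for l in lines[sep + 1:] if l.strip() != "")
--     return grid, list(moves), robot_pos
-- ===== Notes on version B (the rewrite author's own statement) =====
-- stated objective: simpler
-- what changed: Replaces A's single stateful pass (grid/moves/flag/robot accumulated per line) with a split at the first blank line: grid and robot come from the prefix (robot by a backward scan with break), moves from joining the non-blank suffix lines.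
import Mathlib
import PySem

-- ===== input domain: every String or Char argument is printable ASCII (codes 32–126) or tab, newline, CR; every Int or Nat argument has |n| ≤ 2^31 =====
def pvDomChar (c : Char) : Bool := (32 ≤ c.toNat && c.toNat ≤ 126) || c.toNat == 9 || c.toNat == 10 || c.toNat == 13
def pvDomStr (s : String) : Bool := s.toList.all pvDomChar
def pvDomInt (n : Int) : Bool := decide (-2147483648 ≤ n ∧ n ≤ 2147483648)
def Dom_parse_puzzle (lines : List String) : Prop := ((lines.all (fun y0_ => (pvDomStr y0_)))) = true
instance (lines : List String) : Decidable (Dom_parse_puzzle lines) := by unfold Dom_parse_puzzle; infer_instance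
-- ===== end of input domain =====

-- B reorganises A's one stateful pass into a split at the first blank line; equal return values, no side effects.

-- list(s) in Python: the characters of s as one-character strings (shared by both ports)
def pzCharsOf (s : String) : List String := s.toList.map (fun c => String.ofList [c])

-- ===== PORT A =====
-- A's single for-loop with state (grid, moves, grid_readed, robot_pos); under the `"@" in line`
-- guard Python's line.index("@") equals line.find("@"), ported as PySem.Str.find.
def pzLoopA (i : Int) (grid : List (List String)) (moves : String) (readed : Bool)
    (robot : Option (Int × Int)) :
    List String → List (List String) × List String × Option (Int × Int)
  | [] => (grid, pzCharsOf moves, robot)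
  | line :: rest =>
    if PySem.Str.strip line == "" then
      pzLoopA (i + 1) grid moves true robot rest
    else
      let robot' := if readed = false then
          (if PySem.Str.isIn "@" line then some (i, PySem.Str.find line "@") else robot)
        else robot
      let grid' := if readed = false then grid ++ [pzCharsOf line] else grid
      let moves' := if readed = true then moves ++ line else moves
      pzLoopA (i + 1) grid' moves' readed robot' rest

def parse_puzzle (lines : List String) : List (List String) × List String × (Option (Int × Int)) :=
  pzLoopA 0 [] "" false none lines

-- ===== PORT B =====
-- B's backward scan with break over reversed(list(enumerate(lines[:sep])))
def pzScanBack : List (Int × String) → Option (Int × Int)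
  | [] => none
  | (i, l) :: rest =>
    let j := PySem.Str.find l "@"
    if j ≠ -1 then some (i, j) else pzScanBack rest

def parse_puzzle_alt (lines : List String) : List (List String) × List String × (Option (Int × Int)) :=
  let sep := (List.findIdx? (fun l => PySem.Str.strip l == "") lines).getD lines.length
  let pre := lines.take sep
  let grid := pre.map pzCharsOf
  let robot := pzScanBack (PySem.List.enumerate pre 0).reverse
  let moves := PySem.Str.join "" ((lines.drop (sep + 1)).filter (fun l => !(PySem.Str.strip l == "")))
  (grid, pzCharsOf moves, robot)

-- ===== PRECONDITION & SPEC =====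
def Spec_parse_puzzle (lines : List String) (out : List (List String) × List String × (Option (Int × Int))) : Prop := out = parse_puzzle_alt lines
instance (lines : List String) (out : List (List String) × List String × (Option (Int × Int))) : Decidable (Spec_parse_puzzle lines out) := by unfold Spec_parse_puzzle; infer_instance

-- ===== CLAIM (what is proved, stated in full; the proofs are below) =====
def Claim_equal_parse_puzzle : Prop := ∀ (lines : List String), Dom_parse_puzzle lines → Spec_parse_puzzle lines (parse_puzzle lines)

-- ===== LEMMAS AND PROOFS =====

-- A's forward "last @ wins" update, for the robot-position invariant
def pzFwd (i : Int) (robot : Option (Int × Int)) : List String → Option (Int × Int)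
  | [] => robot
  | l :: ls =>
    pzFwd (i + 1) (if PySem.Str.isIn "@" l then some (i, PySem.Str.find l "@") else robot) ls

-- characters of the concatenation of the non-blank lines
def pzMovesChars (ls : List String) : List Char :=
  ((ls.filter (fun l => !(PySem.Str.strip l == ""))).map String.toList).flatten

theorem pz_join_nil_sep (parts : List (List Char)) :
    PySem.Chars.join [] parts = parts.flatten := by
  induction parts with
  | nil => simp [PySem.Chars.join_nil]
  | cons a rest ih =>
    cases rest with
    | nil => simp [PySem.Chars.join_singleton]
    | cons b r => rw [PySem.Chars.join_cons_cons, List.flatten_cons, ih]; simp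

theorem pz_join_toList (ls : List String) :
    (PySem.Str.join "" ls).toList = (ls.map String.toList).flatten := by
  rw [PySem.Str.toList_join]
  have : ("" : String).toList = [] := rfl
  rw [this, pz_join_nil_sep]

theorem pz_isIn_find (cs : List Char) :
    PySem.Chars.isIn ['@'] cs = true ↔ PySem.Chars.find cs ['@'] ≠ -1 := by
  rw [PySem.Chars.isIn_iff_infix, ne_eq, PySem.Chars.find_eq_neg_one_iff]
  tauto

theorem pz_scanBack_append (xs : List (Int × String)) (i : Int) (l : String) :
    pzScanBack (xs ++ [(i, l)]) =
      match pzScanBack xs with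
      | some x => some x
      | none => if PySem.Str.find l "@" ≠ -1 then some (i, PySem.Str.find l "@") else none := by
  induction xs with
  | nil => simp [pzScanBack]
  | cons p rest ih =>
    obtain ⟨j, s⟩ := p
    simp only [List.cons_append, pzScanBack]
    split <;> simp [ih]

theorem pz_fwd_scanBack (pre : List String) (i : Int) (robot : Option (Int × Int)) :
    pzFwd i robot pre =
      match pzScanBack (PySem.List.enumerate pre i).reverse with
      | some x => some x
      | none => robot := by
  induction pre generalizing i robot with
  | nil => simp [pzFwd, PySem.List.enumerate_nil, pzScanBack]
  | cons l ls ih =>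
    rw [pzFwd, ih, PySem.List.enumerate_cons]
    simp only [List.reverse_cons, pz_scanBack_append]
    cases h : pzScanBack (PySem.List.enumerate ls (i + 1)).reverse with
    | some x => rfl
    | none =>
      by_cases hfind : PySem.Chars.find l.toList ['@'] = -1
      · have hin : PySem.Chars.isIn ['@'] l.toList = false := by
          rw [Bool.eq_false_iff]
          intro hc
          exact (pz_isIn_find l.toList).mp hc hfind
        simp [hin, hfind]
      · have hin := (pz_isIn_find l.toList).mpr hfind
        simp [hin, hfind]

-- phase 2: after the separator only moves accumulate
theorem pz_loopA_readed (rest : List String) (i : Int) (grid : List (List String))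
    (moves : String) (robot : Option (Int × Int)) :
    pzLoopA i grid moves true robot rest =
      (grid, (moves.toList ++ pzMovesChars rest).map (fun c => String.ofList [c]), robot) := by
  induction rest generalizing i moves with
  | nil => simp [pzLoopA, pzMovesChars, pzCharsOf]
  | cons l ls ih =>
    rw [pzLoopA]
    by_cases h : PySem.Str.strip l == ""
    · rw [if_pos h, ih]
      simp [pzMovesChars, h]
    · rw [if_neg h]
      simp [ih, pzMovesChars, h, String.toList_append]

-- phase 1: the grid phase, related to B's take/drop at the first blank line
theorem pz_loopA_main (lines : List String) (i : Int) (grid : List (List String))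
    (moves : String) (robot : Option (Int × Int)) :
    pzLoopA i grid moves false robot lines =
      (let sep := (List.findIdx? (fun l => PySem.Str.strip l == "") lines).getD lines.length
       (grid ++ (lines.take sep).map pzCharsOf,
        (moves.toList ++ pzMovesChars (lines.drop (sep + 1))).map (fun c => String.ofList [c]),
        pzFwd i robot (lines.take sep))) := by
  induction lines generalizing i grid moves robot with
  | nil => simp [pzLoopA, pzMovesChars, pzCharsOf, pzFwd]
  | cons l ls ih =>
    rw [pzLoopA]
    by_cases h : PySem.Str.strip l == ""
    · rw [if_pos h, pz_loopA_readed]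
      simp [List.findIdx?_cons, h, pzFwd]
    · rw [if_neg (by simp [h]), ih]
      simp only [List.findIdx?_cons, h, Bool.false_eq_true]
      cases hf : List.findIdx? (fun l => PySem.Str.strip l == "") ls with
      | none =>
        simp [pzFwd, List.take_succ_cons, List.drop_succ_cons, pzCharsOf]
      | some k =>
        simp [pzFwd, List.take_succ_cons, List.drop_succ_cons, pzCharsOf]

-- ===== VERDICT (by name: the statement is the Claim_ definition above) =====
theorem parse_puzzle_spec : Claim_equal_parse_puzzle := by
  intro lines _
  show parse_puzzle lines = parse_puzzle_alt lines
  rw [parse_puzzle, pz_loopA_main, parse_puzzle_alt]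
  simp only [Prod.mk.injEq]
  refine ⟨by simp, ?_, ?_⟩
  · rw [pzCharsOf, pz_join_toList]
    simp [pzMovesChars]
  · rw [pz_fwd_scanBack]
    cases pzScanBack (PySem.List.enumerate (lines.take _) 0).reverse <;> rfl
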